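-- pv_equiv track=rewrite | github.com/bg7nzl/proptracker-client | gridcodec/micropython/gridcodec.py | _compute_dim_masks
-- ===== SOURCE A (Python) =====
-- def _bit_get(buf, bit):
--     return (buf[bit >> 3] >> (bit & 7)) & 1
--
-- def _compute_dim_masks(matrix_bits, n_lons, n_lats):
--     N = n_lons * n_lats
--     slm = sam = dlm = dam = 0
--     for s in range(N):
--         for d in range(N):
--             if _bit_get(matrix_bits, s * N + d):
--                 s_lon, s_lat = s // n_lats, s % n_lats
--                 d_lon, d_lat = d // n_lats, d % n_lats
--                 slm |= 1 << s_lon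
--                 sam |= 1 << s_lat
--                 dlm |= 1 << d_lon
--                 dam |= 1 << d_lat
--     return slm & 0xFFFFFFFF, sam & 0xFFFFFFFF, dlm & 0xFFFFFFFF, dam & 0xFFFFFFFF
-- ===== SOURCE B (Python) =====
-- def _bit_get(buf, bit):
--     return (buf[bit >> 3] >> (bit & 7)) & 1
--
--
-- def _compute_dim_masks(matrix_bits, n_lons, n_lats):
--     # Two independent passes: one over source rows (break at the first set bit
--     # in the row), one over destination columns (break at the first set bit in
--     # the column), instead of A's single combined double loop.
--     N = n_lons * n_lats
--     slm = sam = dlm = dam = 0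
--     for s in range(N):
--         for d in range(N):
--             if _bit_get(matrix_bits, s * N + d):
--                 slm |= 1 << (s // n_lats)
--                 sam |= 1 << (s % n_lats)
--                 break
--     for d in range(N):
--         for s in range(N):
--             if _bit_get(matrix_bits, s * N + d):
--                 dlm |= 1 << (d // n_lats)
--                 dam |= 1 << (d % n_lats)
--                 break
--     return slm & 0xFFFFFFFF, sam & 0xFFFFFFFF, dlm & 0xFFFFFFFF, dam & 0xFFFFFFFF
-- ===== Notes on version B (the rewrite author's own statement) =====
-- stated objective: alternative
-- what changed: A ORs all four masks pairwise inside one combined N*N double loop; B splits this into two independent passes -- a row pass that breaks at the first set bit of each source row to set slm/sam, and a column pass that breaks at the first set bit of each destination column to set dlm/dam -- trading the single quad-state loop for two early-exiting existence scans.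
-- outside the precondition, e.g. on _compute_dim_masks([0], -1, -1): A returns (0, 0, 0, 0), B returns (0, 0, 0, 0); on _compute_dim_masks([1], -1, -1): A returns (1, 1, 1, 1), B returns (1, 1, 1, 1)
import Mathlib
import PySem

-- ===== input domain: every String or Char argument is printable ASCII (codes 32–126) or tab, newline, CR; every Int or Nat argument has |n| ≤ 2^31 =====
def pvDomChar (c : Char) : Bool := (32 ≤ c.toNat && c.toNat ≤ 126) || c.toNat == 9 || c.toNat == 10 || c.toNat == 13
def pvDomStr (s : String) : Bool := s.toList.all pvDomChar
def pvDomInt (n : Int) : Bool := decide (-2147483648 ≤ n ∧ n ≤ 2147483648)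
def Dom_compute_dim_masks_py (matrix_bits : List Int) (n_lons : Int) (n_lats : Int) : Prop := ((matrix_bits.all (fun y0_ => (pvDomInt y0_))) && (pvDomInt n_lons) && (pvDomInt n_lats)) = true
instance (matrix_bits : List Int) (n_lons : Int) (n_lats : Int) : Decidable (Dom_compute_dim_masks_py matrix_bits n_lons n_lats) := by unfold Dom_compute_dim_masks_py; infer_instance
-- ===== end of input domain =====

-- B replaces A's single combined N*N double loop (all four masks updated together) by two
-- independent early-exiting passes: a row pass (break at the first set bit of each source row)
-- for slm/sam and a column pass (break at the first set bit of each destination column) for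
-- dlm/dam; same return value on every input admitted by Pre_ ("alternative" objective, not faster).

-- ===== PORT A =====
-- Python `1 << k`; exact for 0 ≤ k (Python raises ValueError for k < 0; such inputs are outside Pre_)
def pyShl1 (k : Int) : Int := (1 : Int) <<< k.toNat

-- _bit_get: (buf[bit >> 3] >> (bit & 7)) & 1; list access via pyGetD (out-of-range excluded by Pre_);
-- `bit & 7` is nonnegative for every bit, so `.toNat` on it is exact
def bit_get_py (buf : List Int) (bit : Int) : Int :=
  PySem.Int.band ((PySem.List.pyGetD buf (bit >>> 3) 0) >>> (PySem.Int.band bit 7).toNat) 1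

def compute_dim_masks_py (matrix_bits : List Int) (n_lons : Int) (n_lats : Int) : Int × Int × Int × Int :=
  let N := n_lons * n_lats
  let r := (PySem.List.pyRange 0 N 1).foldl (fun st s =>
      (PySem.List.pyRange 0 N 1).foldl (fun st d =>
        if bit_get_py matrix_bits (s * N + d) != 0 then
          (PySem.Int.bor st.1 (pyShl1 (PySem.Int.floordiv s n_lats)),
           PySem.Int.bor st.2.1 (pyShl1 (PySem.Int.mod s n_lats)),
           PySem.Int.bor st.2.2.1 (pyShl1 (PySem.Int.floordiv d n_lats)),
           PySem.Int.bor st.2.2.2 (pyShl1 (PySem.Int.mod d n_lats)))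
        else st) st) (((0 : Int), (0 : Int), (0 : Int), (0 : Int)))
  (PySem.Int.band r.1 4294967295, PySem.Int.band r.2.1 4294967295,
   PySem.Int.band r.2.2.1 4294967295, PySem.Int.band r.2.2.2 4294967295)

-- ===== PORT B =====
-- inner `for d in range(N): if bit: …; break` = "does row s contain a set bit" (List.any short-circuits like the break)
def rowAny (matrix_bits : List Int) (N s : Int) : Bool :=
  (PySem.List.pyRange 0 N 1).any (fun d => bit_get_py matrix_bits (s * N + d) != 0)

-- inner `for s in range(N): if bit: …; break` = "does column d contain a set bit"
def colAny (matrix_bits : List Int) (N d : Int) : Bool :=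
  (PySem.List.pyRange 0 N 1).any (fun s => bit_get_py matrix_bits (s * N + d) != 0)

def compute_dim_masks_py_alt (matrix_bits : List Int) (n_lons : Int) (n_lats : Int) : Int × Int × Int × Int :=
  let N := n_lons * n_lats
  let sp := (PySem.List.pyRange 0 N 1).foldl (fun p s =>
      if rowAny matrix_bits N s then
        (PySem.Int.bor p.1 (pyShl1 (PySem.Int.floordiv s n_lats)),
         PySem.Int.bor p.2 (pyShl1 (PySem.Int.mod s n_lats)))
      else p) (((0 : Int), (0 : Int)))
  let dp := (PySem.List.pyRange 0 N 1).foldl (fun p d =>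
      if colAny matrix_bits N d then
        (PySem.Int.bor p.1 (pyShl1 (PySem.Int.floordiv d n_lats)),
         PySem.Int.bor p.2 (pyShl1 (PySem.Int.mod d n_lats)))
      else p) (((0 : Int), (0 : Int)))
  (PySem.Int.band sp.1 4294967295, PySem.Int.band sp.2 4294967295,
   PySem.Int.band dp.1 4294967295, PySem.Int.band dp.2 4294967295)

-- ===== PRECONDITION & SPEC =====
-- Pre_ excludes exactly the inputs on which Python A raises or returns an accidental value:
-- buffers with fewer than N*N addressable bits (IndexError in _bit_get) and negative dimension
-- counts with N > 0 (A raises ValueError on the first set bit whose lon/lat shift is negative,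
-- and only accidentally returns when no such bit is set); when N ≤ 0 both loops are empty, so
-- any buffer and signs are fine.
def Pre_compute_dim_masks_py (matrix_bits : List Int) (n_lons : Int) (n_lats : Int) : Prop :=
  n_lons * n_lats ≤ 0 ∨
  (0 ≤ n_lons ∧ 0 ≤ n_lats ∧
    (n_lons * n_lats) * (n_lons * n_lats) ≤ 8 * (matrix_bits.length : Int))
instance (matrix_bits : List Int) (n_lons : Int) (n_lats : Int) : Decidable (Pre_compute_dim_masks_py matrix_bits n_lons n_lats) := by unfold Pre_compute_dim_masks_py; infer_instance

def pvWitness_compute_dim_masks_py : List Int × Int × Int := ([1], 1, 1)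

def Spec_compute_dim_masks_py (matrix_bits : List Int) (n_lons : Int) (n_lats : Int) (out : Int × Int × Int × Int) : Prop := out = compute_dim_masks_py_alt matrix_bits n_lons n_lats
instance (matrix_bits : List Int) (n_lons : Int) (n_lats : Int) (out : Int × Int × Int × Int) : Decidable (Spec_compute_dim_masks_py matrix_bits n_lons n_lats out) := by unfold Spec_compute_dim_masks_py; infer_instance

-- ===== CLAIM (what is proved, stated in full; the proofs are below) =====
def Claim_equal_compute_dim_masks_py : Prop := ∀ (matrix_bits : List Int) (n_lons : Int) (n_lats : Int), Dom_compute_dim_masks_py matrix_bits n_lons n_lats → Pre_compute_dim_masks_py matrix_bits n_lons n_lats → Spec_compute_dim_masks_py matrix_bits n_lons n_lats (compute_dim_masks_py matrix_bits n_lons n_lats)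

-- ===== LEMMAS AND PROOFS =====

-- Nat-level guarded OR-fold: the common shape of every accumulator in both ports
def orFold (p : Int → Bool) (f : Int → Nat) (l : List Int) (a : Nat) : Nat :=
  l.foldl (fun a x => if p x then a ||| f x else a) a

theorem orFold_cons (p : Int → Bool) (f : Int → Nat) (x : Int) (l : List Int) (a : Nat) :
    orFold p f (x :: l) a = orFold p f l (if p x then a ||| f x else a) := rfl

theorem orFold_init (p : Int → Bool) (f : Int → Nat) (l : List Int) (a : Nat) :
    orFold p f l a = a ||| orFold p f l 0 := by
  induction l generalizing a with
  | nil => simp [orFold]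
  | cons x l ih =>
    rw [orFold_cons, orFold_cons]
    by_cases h : p x = true
    · simp only [h, if_pos]
      rw [ih (a ||| f x), ih (0 ||| f x), Nat.zero_or, Nat.or_assoc]
    · simp only [Bool.not_eq_true] at h
      simp only [h, Bool.false_eq_true, if_false]
      exact ih a

theorem orFold_false (f : Int → Nat) (l : List Int) (a : Nat) :
    orFold (fun _ => false) f l a = a := by
  induction l generalizing a with
  | nil => rfl
  | cons x l ih => rw [orFold_cons]; simpa using ih a

theorem orFold_congr (p q : Int → Bool) (f : Int → Nat) (l : List Int) (a : Nat)
    (h : ∀ x, p x = q x) : orFold p f l a = orFold q f l a := by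
  induction l generalizing a with
  | nil => rfl
  | cons x l ih => rw [orFold_cons, orFold_cons, h x]; exact ih _

theorem orFold_const (p : Int → Bool) (g : Nat) (l : List Int) :
    orFold p (fun _ => g) l 0 = if l.any p then g else 0 := by
  induction l with
  | nil => rfl
  | cons x l ih =>
    rw [orFold_cons]
    by_cases h : p x = true
    · simp only [h, if_pos, Nat.zero_or, List.any_cons, Bool.true_or]
      rw [orFold_init, ih]
      by_cases h2 : l.any p = true
      · simp [h2, Nat.or_self]
      · simp only [Bool.not_eq_true] at h2; simp [h2]
    · simp only [Bool.not_eq_true] at h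
      simp only [h, Bool.false_eq_true, if_false, List.any_cons, Bool.false_or]
      exact ih

-- union of two guarded OR-folds over the same list
theorem orFold_union (p q : Int → Bool) (f : Int → Nat) (l : List Int) :
    orFold (fun x => p x || q x) f l 0 = orFold p f l 0 ||| orFold q f l 0 := by
  induction l with
  | nil => simp [orFold]
  | cons x l ih =>
    rw [orFold_cons, orFold_cons, orFold_cons]
    rw [orFold_init (fun x => p x || q x), orFold_init p, orFold_init q, ih]
    by_cases hp : p x = true <;> by_cases hq : q x = true <;>
      simp only [hp, hq, Bool.or_false, Bool.or_true,
        Bool.false_eq_true, if_true, if_false, Nat.zero_or] <;>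
      ac_rfl

-- exchanging the loop order: OR over s of (OR over hit d's) = OR over d's hit by some s
theorem orFold_exchange (P : Int → Int → Bool) (f : Int → Nat) (ds : List Int) (ss : List Int) :
    ss.foldl (fun (a : Nat) s => a ||| orFold (P s) f ds 0) 0
      = orFold (fun d => ss.any (fun s => P s d)) f ds 0 := by
  induction ss with
  | nil =>
    rw [List.foldl_nil]
    rw [orFold_congr _ (fun _ => false) f ds 0 (fun x => by simp)]
    rw [orFold_false]
  | cons s ss ih =>
    rw [List.foldl_cons, Nat.zero_or]
    have peel : ∀ (l : List Int) (a : Nat),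
        l.foldl (fun (a : Nat) s => a ||| orFold (P s) f ds 0) a
          = a ||| l.foldl (fun (a : Nat) s => a ||| orFold (P s) f ds 0) 0 := by
      intro l
      induction l with
      | nil => intro a; simp
      | cons y l ihl =>
        intro a
        rw [List.foldl_cons, List.foldl_cons, ihl, ihl (0 ||| _), Nat.zero_or, Nat.or_assoc]
    rw [peel, ih, ← orFold_union]
    exact orFold_congr _ _ f ds 0 (fun d => by simp)

-- pyShl1 is a cast of a Nat
theorem pyShl1_cast (k : Int) : pyShl1 k = ((1 <<< k.toNat : Nat) : Int) := rfl

-- cast lemma for B's pair folds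
theorem foldl_pair_cast (p : Int → Bool) (n1 n2 : Int → Nat) (l : List Int) (a b : Nat) :
    l.foldl (fun (st : Int × Int) x =>
        if p x then (PySem.Int.bor st.1 ((n1 x : Nat) : Int), PySem.Int.bor st.2 ((n2 x : Nat) : Int))
        else st) (((a : Nat) : Int), ((b : Nat) : Int))
      = (((orFold p n1 l a : Nat) : Int), ((orFold p n2 l b : Nat) : Int)) := by
  induction l generalizing a b with
  | nil => rfl
  | cons x l ih =>
    rw [List.foldl_cons, orFold_cons, orFold_cons]
    by_cases h : p x = true
    · simp only [h, if_pos, PySem.Int.bor_natCast]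
      exact ih (a ||| n1 x) (b ||| n2 x)
    · simp only [Bool.not_eq_true] at h
      simp only [h, Bool.false_eq_true, if_false]
      exact ih a b

-- the Nat-level analogue of A's inner loop
def innerNat (P : Int → Bool) (c1 c2 : Nat) (h1 h2 : Int → Nat) (ds : List Int)
    (st : Nat × Nat × Nat × Nat) : Nat × Nat × Nat × Nat :=
  ds.foldl (fun st d =>
    if P d then (st.1 ||| c1, st.2.1 ||| c2, st.2.2.1 ||| h1 d, st.2.2.2 ||| h2 d) else st) st

-- cast lemma for A's inner loop (constants c1 c2 for the source masks, h1 h2 for the dest masks)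
theorem foldl_quad_cast (P : Int → Bool) (c1 c2 : Nat) (h1 h2 : Int → Nat) (ds : List Int)
    (a b c e : Nat) :
    ds.foldl (fun (st : Int × Int × Int × Int) d =>
        if P d then
          (PySem.Int.bor st.1 ((c1 : Nat) : Int),
           PySem.Int.bor st.2.1 ((c2 : Nat) : Int),
           PySem.Int.bor st.2.2.1 ((h1 d : Nat) : Int),
           PySem.Int.bor st.2.2.2 ((h2 d : Nat) : Int))
        else st) (((a : Nat) : Int), ((b : Nat) : Int), ((c : Nat) : Int), ((e : Nat) : Int))
      = ((((innerNat P c1 c2 h1 h2 ds (a, b, c, e)).1 : Nat) : Int),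
         (((innerNat P c1 c2 h1 h2 ds (a, b, c, e)).2.1 : Nat) : Int),
         (((innerNat P c1 c2 h1 h2 ds (a, b, c, e)).2.2.1 : Nat) : Int),
         (((innerNat P c1 c2 h1 h2 ds (a, b, c, e)).2.2.2 : Nat) : Int)) := by
  induction ds generalizing a b c e with
  | nil => rfl
  | cons d ds ih =>
    rw [List.foldl_cons]
    have hstep : ∀ st : Nat × Nat × Nat × Nat, innerNat P c1 c2 h1 h2 (d :: ds) st
        = innerNat P c1 c2 h1 h2 ds
            (if P d then (st.1 ||| c1, st.2.1 ||| c2, st.2.2.1 ||| h1 d, st.2.2.2 ||| h2 d) else st) := by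
      intro st; rfl
    rw [hstep]
    by_cases h : P d = true
    · simp only [h, if_pos, PySem.Int.bor_natCast]
      exact ih (a ||| c1) (b ||| c2) (c ||| h1 d) (e ||| h2 d)
    · simp only [Bool.not_eq_true] at h
      simp only [h, Bool.false_eq_true, if_false]
      exact ih a b c e

-- componentwise characterisation of A's inner loop
theorem innerNat_eq (P : Int → Bool) (c1 c2 : Nat) (h1 h2 : Int → Nat) (ds : List Int)
    (st : Nat × Nat × Nat × Nat) :
    innerNat P c1 c2 h1 h2 ds st
      = ((if ds.any P then st.1 ||| c1 else st.1),
         (if ds.any P then st.2.1 ||| c2 else st.2.1),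
         orFold P h1 ds st.2.2.1,
         orFold P h2 ds st.2.2.2) := by
  obtain ⟨a, b, c, e⟩ := st
  have key : ∀ (l : List Int) (a b c e : Nat),
      innerNat P c1 c2 h1 h2 l (a, b, c, e)
        = (orFold P (fun _ => c1) l a, orFold P (fun _ => c2) l b, orFold P h1 l c, orFold P h2 l e) := by
    intro l
    induction l with
    | nil => intro a b c e; rfl
    | cons d l ihl =>
      intro a b c e
      show innerNat P c1 c2 h1 h2 l (if P d then _ else _) = _
      rw [orFold_cons, orFold_cons, orFold_cons, orFold_cons]
      by_cases h : P d = true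
      · simp only [h, if_pos]; exact ihl _ _ _ _
      · simp only [Bool.not_eq_true] at h
        simp only [h, Bool.false_eq_true, if_false]
        exact ihl a b c e
  rw [key]
  have cconst : ∀ (g : Nat) (a : Nat), orFold P (fun _ => g) ds a = if ds.any P then a ||| g else a := by
    intro g a
    rw [orFold_init, orFold_const]
    by_cases h : ds.any P = true
    · simp [h]
    · simp only [Bool.not_eq_true] at h; simp [h]
  rw [cconst, cconst]

-- A's outer loop, Nat level, decomposed into four independent folds
theorem outerNat_eq (P : Int → Int → Bool) (g1 g2 : Int → Nat) (h1 h2 : Int → Nat)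
    (ds : List Int) (ss : List Int) (a b c e : Nat) :
    ss.foldl (fun st s => innerNat (P s) (g1 s) (g2 s) h1 h2 ds st) (a, b, c, e)
      = (ss.foldl (fun a s => if ds.any (P s) then a ||| g1 s else a) a,
         ss.foldl (fun b s => if ds.any (P s) then b ||| g2 s else b) b,
         ss.foldl (fun c s => orFold (P s) h1 ds c) c,
         ss.foldl (fun e s => orFold (P s) h2 ds e) e) := by
  induction ss generalizing a b c e with
  | nil => rfl
  | cons s ss ih =>
    simp only [List.foldl_cons]
    rw [innerNat_eq]
    exact ih _ _ _ _

theorem orFold_foldl_peel (P : Int → Int → Bool) (f : Int → Nat) (ds ss : List Int) (c : Nat) :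
    ss.foldl (fun c s => orFold (P s) f ds c) c
      = ss.foldl (fun (a : Nat) s => a ||| orFold (P s) f ds 0) c := by
  induction ss generalizing c with
  | nil => rfl
  | cons s ss ih => rw [List.foldl_cons, List.foldl_cons, orFold_init]; exact ih _

-- cast lemma for A's full double loop
theorem A_cast (P : Int → Int → Bool) (g1 g2 h1 h2 : Int → Nat) (ds ss : List Int)
    (a b c e : Nat) :
    ss.foldl (fun st s => ds.foldl (fun (st : Int × Int × Int × Int) d =>
        if P s d then
          (PySem.Int.bor st.1 ((g1 s : Nat) : Int),
           PySem.Int.bor st.2.1 ((g2 s : Nat) : Int),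
           PySem.Int.bor st.2.2.1 ((h1 d : Nat) : Int),
           PySem.Int.bor st.2.2.2 ((h2 d : Nat) : Int))
        else st) st) (((a : Nat) : Int), ((b : Nat) : Int), ((c : Nat) : Int), ((e : Nat) : Int))
      = ((((ss.foldl (fun st s => innerNat (P s) (g1 s) (g2 s) h1 h2 ds st) (a, b, c, e)).1 : Nat) : Int),
         (((ss.foldl (fun st s => innerNat (P s) (g1 s) (g2 s) h1 h2 ds st) (a, b, c, e)).2.1 : Nat) : Int),
         (((ss.foldl (fun st s => innerNat (P s) (g1 s) (g2 s) h1 h2 ds st) (a, b, c, e)).2.2.1 : Nat) : Int),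
         (((ss.foldl (fun st s => innerNat (P s) (g1 s) (g2 s) h1 h2 ds st) (a, b, c, e)).2.2.2 : Nat) : Int)) := by
  induction ss generalizing a b c e with
  | nil => rfl
  | cons s ss ih =>
    rw [List.foldl_cons, List.foldl_cons, foldl_quad_cast]
    exact ih _ _ _ _

-- the whole Nat-level computation of A, rearranged into B's four independent folds
theorem grand (P : Int → Int → Bool) (g1 g2 h1 h2 : Int → Nat) (ds ss : List Int) :
    ss.foldl (fun st s => innerNat (P s) (g1 s) (g2 s) h1 h2 ds st) (((0 : Nat), (0 : Nat), (0 : Nat), (0 : Nat)))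
      = (orFold (fun s => ds.any (fun d => P s d)) g1 ss 0,
         orFold (fun s => ds.any (fun d => P s d)) g2 ss 0,
         orFold (fun d => ss.any (fun s => P s d)) h1 ds 0,
         orFold (fun d => ss.any (fun s => P s d)) h2 ds 0) := by
  rw [outerNat_eq]
  refine Prod.ext rfl (Prod.ext rfl (Prod.ext ?_ ?_)) <;>
    simp only [orFold_foldl_peel, orFold_exchange]

-- ===== main equivalence, unconditional on the ports =====
theorem masks_eq (matrix_bits : List Int) (n_lons : Int) (n_lats : Int) :
    compute_dim_masks_py matrix_bits n_lons n_lats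
      = compute_dim_masks_py_alt matrix_bits n_lons n_lats := by
  unfold compute_dim_masks_py compute_dim_masks_py_alt rowAny colAny
  simp only [pyShl1_cast]
  have hz : ((0 : Nat) : Int) = (0 : Int) := rfl
  have hA := A_cast (fun s d => bit_get_py matrix_bits (s * (n_lons * n_lats) + d) != 0)
      (fun s => 1 <<< (PySem.Int.floordiv s n_lats).toNat)
      (fun s => 1 <<< (PySem.Int.mod s n_lats).toNat)
      (fun d => 1 <<< (PySem.Int.floordiv d n_lats).toNat)
      (fun d => 1 <<< (PySem.Int.mod d n_lats).toNat)
      (PySem.List.pyRange 0 (n_lons * n_lats) 1) (PySem.List.pyRange 0 (n_lons * n_lats) 1) 0 0 0 0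
  rw [hz] at hA
  have hB1 := foldl_pair_cast
      (fun s => (PySem.List.pyRange 0 (n_lons * n_lats) 1).any
        (fun d => bit_get_py matrix_bits (s * (n_lons * n_lats) + d) != 0))
      (fun s => 1 <<< (PySem.Int.floordiv s n_lats).toNat)
      (fun s => 1 <<< (PySem.Int.mod s n_lats).toNat)
      (PySem.List.pyRange 0 (n_lons * n_lats) 1) 0 0
  have hB2 := foldl_pair_cast
      (fun d => (PySem.List.pyRange 0 (n_lons * n_lats) 1).any
        (fun s => bit_get_py matrix_bits (s * (n_lons * n_lats) + d) != 0))
      (fun d => 1 <<< (PySem.Int.floordiv d n_lats).toNat)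
      (fun d => 1 <<< (PySem.Int.mod d n_lats).toNat)
      (PySem.List.pyRange 0 (n_lons * n_lats) 1) 0 0
  rw [hz] at hB1 hB2
  rw [hA, hB1, hB2, grand]

-- ===== VERDICT (by name: the statement is the Claim_ definition above) =====
theorem compute_dim_masks_py_spec : Claim_equal_compute_dim_masks_py := by
  intro matrix_bits n_lons n_lats _ _
  unfold Spec_compute_dim_masks_py
  exact masks_eq matrix_bits n_lons n_lats
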